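-- pv_equiv track=rewrite | github.com/ashdaily/pyalgos | google_foobar/level_3.py | solution
-- ===== SOURCE A (Python) =====
-- def solution(start, length):
--     ids = [i for i in range(start, start+(length**2))]
--     matrix = []
--     for idx, value in enumerate(ids):
--         if (idx+1)%length == 0:
--             batch = ids[idx-length+1:idx+1]
--             matrix.append(batch)
--
--     max_idx = length - 1
--     result = None
--     for arr_idx, arr in enumerate(matrix):
--         for element_idx, element in enumerate(arr):
--             if element_idx <= max_idx:
--                 if result is None:
--                     result = element
--                 else:
--                     result ^= element
--         max_idx -= 1
--     return result
-- ===== SOURCE B (Python) =====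
-- def solution(start, length):
--     # XOR of the upper-left triangle of the length x length grid of consecutive
--     # ints starting at start, via the O(1) closed form for XOR of an integer range.
--     if length <= 0:
--         return None
--
--     def pf(n):
--         # XOR of 0..n-1 for n >= 0
--         r = n % 4
--         if r == 0:
--             return 0
--         if r == 1:
--             return n - 1
--         if r == 2:
--             return 1
--         return n
--
--     def range_xor(a, b):
--         # XOR of all integers in [a, b), any signs, a <= b
--         if a >= 0:
--             return pf(b) ^ pf(a)
--         if b <= 0:
--             x = pf(-a) ^ pf(-b)
--             return x ^ -1 if (b - a) % 2 == 1 else x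
--         return range_xor(a, 0) ^ range_xor(0, b)
--
--     acc = 0
--     for r in range(length):
--         a = start + r * length
--         acc ^= range_xor(a, a + (length - r))
--     return acc
-- ===== Notes on version B (the rewrite author's own statement) =====
-- stated objective: faster
-- what changed: B drops A's materialised length^2 grid, slicing and element-by-element XOR loop and instead XORs, for each of the length rows, the contiguous integer range of the triangle prefix in O(1) via the closed-form prefix-XOR formula (n%4 pattern, extended to negative ranges by two's-complement), so B does O(length) work instead of O(length^2).
import Mathlib
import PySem

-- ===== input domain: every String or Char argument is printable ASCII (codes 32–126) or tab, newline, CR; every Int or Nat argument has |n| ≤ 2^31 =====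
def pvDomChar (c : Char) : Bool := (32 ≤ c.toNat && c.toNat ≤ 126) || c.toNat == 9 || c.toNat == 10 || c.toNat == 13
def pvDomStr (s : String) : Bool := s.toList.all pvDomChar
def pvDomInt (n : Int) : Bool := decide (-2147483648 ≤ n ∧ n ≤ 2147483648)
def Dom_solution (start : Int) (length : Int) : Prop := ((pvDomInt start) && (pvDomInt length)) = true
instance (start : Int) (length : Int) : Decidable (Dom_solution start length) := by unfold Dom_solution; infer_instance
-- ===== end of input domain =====

-- B replaces A's materialised grid and O(length^2) element-by-element XOR by the
-- O(1) closed form for the XOR of a contiguous integer range, applied once per row.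

-- ===== PORT A =====
def solution (start : Int) (length : Int) : Option Int :=
  let ids := PySem.List.pyRange start (start + length ^ 2)
  -- 'for idx, value in enumerate(ids)' ported as a fold carrying the running index idx
  let matrix : List (List Int) :=
    (ids.foldl
      (fun (st : Int × List (List Int)) _value =>
        (st.1 + 1,
         if PySem.Int.mod (st.1 + 1) length == 0 then
           st.2 ++ [PySem.List.slice ids (some (st.1 - length + 1)) (some (st.1 + 1))]
         else st.2))
      (0, [])).2
  let st : Int × Option Int :=
    matrix.foldl
      (fun st arr =>
        -- 'for element_idx, element in enumerate(arr)' as a fold carrying element_idx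
        let res := (arr.foldl
          (fun (q : Int × Option Int) element =>
            (q.1 + 1,
             if q.1 ≤ st.1 then
               some (match q.2 with
                     | none => element
                     | some v => PySem.Int.bxor v element)
             else q.2))
          (0, st.2)).2
        (st.1 - 1, res))
      (length - 1, none)
  st.2

-- ===== PORT B =====
-- XOR of 0..n-1 for n ≥ 0, closed form
def pf (n : Int) : Int :=
  let r := PySem.Int.mod n 4
  if r == 0 then 0
  else if r == 1 then n - 1
  else if r == 2 then 1
  else n

-- XOR of all integers in [a, b), any signs, a ≤ b
def rangeXor (a b : Int) : Int :=
  if 0 ≤ a then PySem.Int.bxor (pf b) (pf a)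
  else if b ≤ 0 then
    let x := PySem.Int.bxor (pf (-a)) (pf (-b))
    if PySem.Int.mod (b - a) 2 == 1 then PySem.Int.bxor x (-1) else x
  else PySem.Int.bxor (rangeXor a 0) (rangeXor 0 b)
termination_by ((if 0 ≤ a then 0 else if b ≤ 0 then 0 else 1 : Nat))
decreasing_by
  · split_ifs <;> omega
  · split_ifs <;> omega

def solution_alt (start : Int) (length : Int) : Option Int :=
  if length ≤ 0 then none
  else
    some ((PySem.List.pyRange 0 length).foldl
      (fun acc r =>
        PySem.Int.bxor acc
          (rangeXor (start + r * length) (start + r * length + (length - r)))) 0)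

-- ===== PRECONDITION & SPEC =====
def Spec_solution (start : Int) (length : Int) (out : Option Int) : Prop := out = solution_alt start length
instance (start : Int) (length : Int) (out : Option Int) : Decidable (Spec_solution start length out) := by unfold Spec_solution; infer_instance

-- ===== CLAIM (what is proved, stated in full; the proofs are below) =====
def Claim_equal_solution : Prop := ∀ (start : Int) (length : Int), Dom_solution start length → Spec_solution start length (solution start length)

-- ===== LEMMAS AND PROOFS =====

-- XOR algebra for PySem.Int.bxor
theorem bxor_eq_xor (a b : Int) : PySem.Int.bxor a b = Int.xor a b := by
  cases a with
  | ofNat m => cases b with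
    | ofNat n => simp [PySem.Int.bxor, Int.xor]
    | negSucc n => simp [PySem.Int.bxor, Int.xor, Int.negSucc_eq]; omega
  | negSucc m => cases b with
    | ofNat n => simp [PySem.Int.bxor, Int.xor, Int.negSucc_eq]; omega
    | negSucc n => simp [PySem.Int.bxor, Int.xor, Int.negSucc_eq]; omega

theorem bxa (a b c : Int) :
    PySem.Int.bxor (PySem.Int.bxor a b) c = PySem.Int.bxor a (PySem.Int.bxor b c) := by
  simp only [bxor_eq_xor]
  cases a <;> cases b <;> cases c <;> simp [Int.xor, Nat.xor_assoc]

theorem zero_bxor (a : Int) : PySem.Int.bxor 0 a = a := by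
  rw [PySem.Int.bxor_comm]; exact PySem.Int.bxor_zero a

theorem bx_left_comm (a b c : Int) :
    PySem.Int.bxor a (PySem.Int.bxor b c) = PySem.Int.bxor b (PySem.Int.bxor a c) := by
  rw [← bxa, PySem.Int.bxor_comm a b, bxa]

theorem bx_cancel (a b : Int) : PySem.Int.bxor a (PySem.Int.bxor a b) = b := by
  rw [← bxa, PySem.Int.bxor_self, zero_bxor]

theorem bxor_neg_one (a : Int) : PySem.Int.bxor a (-1) = -1 - a := by
  rw [bxor_eq_xor]
  have h : (-1 : Int) = Int.negSucc 0 := rfl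
  rw [h]
  cases a with
  | ofNat m => simp [Int.xor, Int.negSucc_eq]; omega
  | negSucc m => simp [Int.xor, Int.negSucc_eq]

theorem two_mul_xor_one (t : Nat) : 2 * t ^^^ 1 = 2 * t + 1 := by
  apply Nat.eq_of_testBit_eq; intro i
  cases i with
  | zero => simp [Nat.mul_comm]
  | succ j => simp [Nat.testBit_succ, Nat.mul_comm]

-- XOR of the integer range [a, b)
def X (a b : Int) : Int := (PySem.List.pyRange a b).foldl PySem.Int.bxor 0

theorem hoist (l : List Int) (x : Int) :
    l.foldl PySem.Int.bxor x = PySem.Int.bxor x (l.foldl PySem.Int.bxor 0) := by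
  induction l generalizing x with
  | nil => simp [PySem.Int.bxor_zero]
  | cons h t ih =>
    conv_lhs => rw [List.foldl_cons, ih]
    conv_rhs => rw [List.foldl_cons, ih]
    rw [zero_bxor, bxa]

theorem X_empty (a b : Int) (h : b ≤ a) : X a b = 0 := by
  unfold X; rw [PySem.List.pyRange_one_eq_nil h]; rfl

theorem X_succ (a b : Int) (h : a ≤ b) : X a (b + 1) = PySem.Int.bxor (X a b) b := by
  unfold X
  rw [PySem.List.pyRange_one_succ_right h, List.foldl_append]
  simp

theorem X_append (a m b : Int) (h1 : a ≤ m) (h2 : m ≤ b) :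
    X a b = PySem.Int.bxor (X a m) (X m b) := by
  unfold X
  rw [PySem.List.pyRange_one_append a m b h1 h2, List.foldl_append, hoist]

theorem pf_step (k : Nat) : pf ((k : Int) + 1) = PySem.Int.bxor (pf (k : Int)) (k : Int) := by
  rcases (show k % 4 = 0 ∨ k % 4 = 1 ∨ k % 4 = 2 ∨ k % 4 = 3 by omega) with h | h | h | h
  · simp [pf]; split_ifs <;> try omega
    rw [PySem.Int.bxor_comm]; exact (PySem.Int.bxor_zero _).symm
  · obtain ⟨t, ht⟩ : ∃ t, k = 2 * t + 1 := ⟨k / 2, by omega⟩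
    simp [pf]; split_ifs <;> try omega
    rw [show ((k:Int)) - 1 = ((2*t : Nat) : Int) by push_cast; omega,
        show ((k:Int)) = ((2*t+1 : Nat) : Int) by push_cast; omega,
        PySem.Int.bxor_natCast,
        show 2*t+1 = 2*t ^^^ 1 from (two_mul_xor_one t).symm,
        Nat.xor_xor_cancel_left]
    norm_num
  · obtain ⟨t, ht⟩ : ∃ t, k = 2 * t := ⟨k / 2, by omega⟩
    simp [pf]; split_ifs <;> try omega
    rw [show ((1:Int)) = ((1 : Nat) : Int) by norm_num,
        show ((k:Int)) = ((2*t : Nat) : Int) by push_cast; omega,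
        PySem.Int.bxor_natCast, Nat.xor_comm, two_mul_xor_one]
    push_cast; omega
  · simp [pf]; split_ifs <;> try omega
    exact (PySem.Int.bxor_self _).symm

theorem pf_natCast (k : Nat) : pf (k : Int) = X 0 (k : Int) := by
  induction k with
  | zero => simp [pf, PySem.Int.mod, X_empty 0 0 le_rfl]
  | succ k ih =>
    rw [show ((k+1 : Nat) : Int) = (k : Int) + 1 by push_cast; ring, pf_step, ih,
        X_succ 0 (k : Int) (by positivity)]

theorem pf_eq (n : Int) (h : 0 ≤ n) : pf n = X 0 n := by
  have : n = ((n.toNat : Nat) : Int) := by omega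
  rw [this, pf_natCast]

theorem Xneg (d k : Nat) :
    X (-((k + d : Nat) : Int)) (-(k : Int)) =
      PySem.Int.bxor (PySem.Int.bxor (X 0 ((k + d : Nat) : Int)) (X 0 (k : Int)))
        (if d % 2 = 1 then -1 else 0) := by
  induction d generalizing k with
  | zero => simp [X_empty _ _ le_rfl, PySem.Int.bxor_self]
  | succ d ih =>
    rw [show k + (d + 1) = (k + 1) + d by omega,
        show (-(k : Int)) = (-(((k+1) : Nat) : Int)) + 1 by push_cast; ring,
        X_succ _ _ (by push_cast; omega), ih (k + 1),
        show (-(((k+1) : Nat) : Int)) = PySem.Int.bxor (k : Int) (-1) by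
          rw [bxor_neg_one]; push_cast; ring,
        show (((k+1) : Nat) : Int) = (k : Int) + 1 by push_cast; ring,
        X_succ 0 (k : Int) (by positivity)]
    rcases (show d % 2 = 0 ∨ d % 2 = 1 by omega) with h | h
    · rw [h, show (d+1) % 2 = 1 by omega]
      norm_num
      simp [bx_left_comm, PySem.Int.bxor_comm, bx_cancel]
    · rw [h, show (d+1) % 2 = 0 by omega]
      norm_num
      simp [bx_left_comm, PySem.Int.bxor_comm, bx_cancel]

theorem rangeXor_nonneg (a b : Int) (h0 : 0 ≤ a) (h : a ≤ b) : rangeXor a b = X a b := by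
  rw [rangeXor, if_pos h0, pf_eq b (by omega), pf_eq a h0, X_append 0 a b h0 h,
      PySem.Int.bxor_comm (X 0 a) (X a b), bxa, PySem.Int.bxor_self, PySem.Int.bxor_zero]

theorem rangeXor_nonpos (a b : Int) (ha : a < 0) (hb : b ≤ 0) (h : a ≤ b) :
    rangeXor a b = X a b := by
  have hbe : b = -(((-b).toNat : Nat) : Int) := by omega
  have hae : a = -((((-b).toNat + (b - a).toNat : Nat)) : Int) := by push_cast; omega
  have hc : PySem.Int.mod (b - a) 2 = (((b - a).toNat % 2 : Nat) : Int) := by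
    rw [PySem.Int.mod_eq_emod_of_pos (by norm_num)]; omega
  have hX := Xneg ((b - a).toNat) ((-b).toNat)
  rw [← hae, ← hbe] at hX
  rw [rangeXor, if_neg (by omega), if_pos hb]
  simp only [hc]
  rw [show -a = (((-b).toNat + (b - a).toNat : Nat) : Int) by push_cast; omega,
      show -b = (((-b).toNat : Nat) : Int) by omega,
      pf_natCast, pf_natCast, hX]
  rcases (show (b - a).toNat % 2 = 0 ∨ (b - a).toNat % 2 = 1 by omega) with h2 | h2 <;>
    simp [h2]

theorem rangeXor_eq (a b : Int) (h : a ≤ b) : rangeXor a b = X a b := by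
  rcases (show 0 ≤ a ∨ a < 0 by omega) with h0 | h0
  · exact rangeXor_nonneg a b h0 h
  · rcases (show b ≤ 0 ∨ 0 < b by omega) with h1 | h1
    · exact rangeXor_nonpos a b h0 h1 h
    · rw [rangeXor, if_neg (by omega), if_neg (by omega),
          rangeXor_nonpos a 0 h0 le_rfl (by omega),
          rangeXor_nonneg 0 b le_rfl (by omega),
          X_append a 0 b (by omega) (by omega)]


-- ---------- A-side machinery ----------

-- XOR over the upper-left triangle, row by row
def G (start L : Int) (rs : List Int) : Int :=
  rs.foldl (fun acc r => PySem.Int.bxor acc (X (start + r * L) (start + r * L + (L - r)))) 0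

def optStep (r : Option Int) (x : Int) : Option Int :=
  some (match r with
        | none => x
        | some v => PySem.Int.bxor v x)

def stepE (st : Int × Option Int) (arr : List Int) : Int × Option Int :=
  (st.1 - 1,
   (PySem.List.enumerate arr).foldl
     (fun (r : Option Int) q => if q.1 ≤ st.1 then optStep r q.2 else r) st.2)

def stepF (st : Int × Option Int) (arr : List Int) : Int × Option Int :=
  (st.1 - 1,
   (arr.foldl
     (fun (q : Int × Option Int) element =>
       (q.1 + 1, if q.1 ≤ st.1 then optStep q.2 element else q.2))
     (0, st.2)).2)

def matrixDef (start L : Int) : List (List Int) :=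
  let ids := PySem.List.pyRange start (start + L ^ 2)
  (ids.foldl
    (fun (st : Int × List (List Int)) _value =>
      (st.1 + 1,
       if PySem.Int.mod (st.1 + 1) L == 0 then
         st.2 ++ [PySem.List.slice ids (some (st.1 - L + 1)) (some (st.1 + 1))]
       else st.2))
    (0, [])).2

theorem solution_unfold (start L : Int) :
    solution start L = ((matrixDef start L).foldl stepF (L - 1, none)).2 := rfl

-- an index-carrying fold is the fold over enumerate
theorem foldl_enum_bridge {α β : Type} (g : Int → β → α → β) (l : List α) :
    ∀ (s : Int) (b : β),
      l.foldl (fun (st : Int × β) x => (st.1 + 1, g st.1 st.2 x)) (s, b)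
        = (s + l.length, (PySem.List.enumerate l s).foldl (fun b q => g q.1 b q.2) b) := by
  induction l with
  | nil => intro s b; simp [PySem.List.enumerate_nil]
  | cons x t ih =>
    intro s b
    rw [List.foldl_cons, PySem.List.enumerate_cons, List.foldl_cons, ih]
    simp only [Prod.mk.injEq, List.length_cons]
    refine ⟨?_, trivial⟩
    push_cast
    ring

theorem stepF_eq_stepE : stepF = stepE := by
  funext st arr
  unfold stepF stepE
  rw [foldl_enum_bridge (fun i r x => if i ≤ st.1 then optStep r x else r) arr 0 st.2]

theorem alt_eq (start L : Int) (h : 0 < L) :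
    solution_alt start L = some (G start L (PySem.List.pyRange 0 L)) := by
  unfold solution_alt
  rw [if_neg (by omega)]
  congr 1
  apply PySem.List.foldl_congr_mem
  intro acc r hr
  rw [PySem.List.mem_pyRange_one] at hr
  rw [rangeXor_eq _ _ (by omega)]

theorem inner_fold (K : Int) (l : List Int) :
    ∀ (s : Int) (acc : Option Int), 0 ≤ s →
      (PySem.List.enumerate l s).foldl
          (fun (r : Option Int) q => if q.1 ≤ K then optStep r q.2 else r) acc
        = (l.take ((K - s + 1).toNat)).foldl optStep acc := by
  induction l with
  | nil => intro s acc hs; simp [PySem.List.enumerate_nil]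
  | cons x t ih =>
    intro s acc hs
    rw [PySem.List.enumerate_cons, List.foldl_cons]
    by_cases hK : s ≤ K
    · rw [if_pos hK, ih (s + 1) _ (by omega),
          show (K - s + 1).toNat = (K - (s + 1) + 1).toNat + 1 by omega,
          List.take_succ_cons, List.foldl_cons]
    · rw [if_neg hK, ih (s + 1) _ (by omega),
          show (K - (s + 1) + 1).toNat = 0 by omega,
          show (K - s + 1).toNat = 0 by omega]
      simp

theorem optFold_some (l : List Int) : ∀ v : Int,
    l.foldl optStep (some v) = some (l.foldl PySem.Int.bxor v) := by
  induction l with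
  | nil => intro v; rfl
  | cons x t ih => intro v; rw [List.foldl_cons, List.foldl_cons]; exact ih _

theorem optFold_none (l : List Int) (hl : l ≠ []) :
    l.foldl optStep none = some (l.foldl PySem.Int.bxor 0) := by
  cases l with
  | nil => exact absurd rfl hl
  | cons x t =>
    rw [List.foldl_cons, List.foldl_cons, zero_bxor]
    exact optFold_some t x

theorem take_pyRange (a b c : Int) (h1 : a ≤ b) (h2 : b ≤ c) :
    (PySem.List.pyRange a c).take ((b - a).toNat) = PySem.List.pyRange a b := by
  rw [PySem.List.pyRange_one_append a b c h1 h2,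
      List.take_left' (PySem.List.length_pyRange_one a b)]

theorem drop_pyRange (a b c : Int) (h1 : a ≤ b) (h2 : b ≤ c) :
    (PySem.List.pyRange a c).drop ((b - a).toNat) = PySem.List.pyRange b c := by
  rw [PySem.List.pyRange_one_append a b c h1 h2,
      List.drop_left' (PySem.List.length_pyRange_one a b)]

theorem slice_ids (start L r : Int) (hL : 0 < L) (hr0 : 0 ≤ r) (hr : r < L) :
    PySem.List.slice (PySem.List.pyRange start (start + L ^ 2))
        (some (r * L + (L - 1) - L + 1)) (some (r * L + (L - 1) + 1))
      = PySem.List.pyRange (start + r * L) (start + r * L + L) := by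
  have hrL : 0 ≤ r * L := mul_nonneg hr0 (by omega)
  have hub : r * L + L ≤ L ^ 2 := by nlinarith
  rw [show r * L + (L - 1) - L + 1 = r * L by ring,
      show r * L + (L - 1) + 1 = r * L + L by ring,
      PySem.List.slice_toNat _ hrL (by omega),
      show (r * L).toNat = ((start + r * L) - start).toNat by omega,
      drop_pyRange start (start + r * L) (start + L ^ 2) (by omega) (by omega),
      show (r * L + L).toNat - ((start + r * L) - start).toNat
          = ((start + r * L + L) - (start + r * L)).toNat by omega,
      take_pyRange _ _ _ (by omega) (by omega)]

theorem filter_block (L n : Int) (hL : 0 < L) :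
    (PySem.List.pyRange (L * n) (L * n + L)).filter
        (fun j => PySem.Int.mod (j + 1) L == 0) = [L * n + L - 1] := by
  rw [PySem.List.pyRange_one_append (L * n) (L * n + L - 1) (L * n + L) (by omega) (by omega),
      List.filter_append]
  have h1 : (PySem.List.pyRange (L * n) (L * n + L - 1)).filter
      (fun j => PySem.Int.mod (j + 1) L == 0) = [] := by
    rw [List.filter_eq_nil_iff]
    intro j hj
    rw [PySem.List.mem_pyRange_one] at hj
    simp only [beq_iff_eq, PySem.Int.mod_eq_zero_iff_dvd]
    rintro ⟨t, ht⟩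
    have h2 : n < t := Int.lt_of_mul_lt_mul_left (a := L) (by omega) (by omega)
    have h3 : t < n + 1 := Int.lt_of_mul_lt_mul_left (a := L)
      (by rw [mul_add, mul_one]; omega) (by omega)
    omega
  have h2 : PySem.List.pyRange (L * n + L - 1) (L * n + L) = [L * n + L - 1] := by
    have := PySem.List.pyRange_one_singleton (L * n + L - 1)
    rw [show L * n + L - 1 + 1 = L * n + L by ring] at this
    exact this
  have h3 : (PySem.Int.mod (L * n + L - 1 + 1) L == 0) = true := by
    simp only [beq_iff_eq, PySem.Int.mod_eq_zero_iff_dvd]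
    exact ⟨n + 1, by ring⟩
  rw [h1, h2, List.nil_append, List.filter_cons, h3]
  rfl

theorem filt (L : Int) (hL : 0 < L) : ∀ n : Nat,
    (PySem.List.pyRange 0 ((n : Int) * L)).filter (fun j => PySem.Int.mod (j + 1) L == 0)
      = (PySem.List.pyRange 0 (n : Int)).map (fun r => r * L + (L - 1)) := by
  intro n
  induction n with
  | zero => simp [PySem.List.pyRange_one_eq_nil]
  | succ n ih =>
    rw [show ((n + 1 : Nat) : Int) * L = (n : Int) * L + L by push_cast; ring,
        PySem.List.pyRange_one_append 0 ((n : Int) * L) ((n : Int) * L + L)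
          (by positivity) (by omega),
        List.filter_append, ih,
        show (n : Int) * L = L * (n : Int) by ring,
        filter_block L (n : Int) hL,
        show ((n + 1 : Nat) : Int) = (n : Int) + 1 by push_cast; ring,
        PySem.List.pyRange_one_succ_right (by positivity), List.map_append]
    congr 1
    simp only [List.map_cons, List.map_nil]
    congr 1
    ring

theorem matrix_eq (start L : Int) (hL : 0 < L) :
    matrixDef start L
      = (PySem.List.pyRange 0 L).map
          (fun r => PySem.List.pyRange (start + r * L) (start + r * L + L)) := by
  simp only [matrixDef]
  rw [foldl_enum_bridge
        (fun i m _v =>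
          if PySem.Int.mod (i + 1) L == 0 then
            m ++ [PySem.List.slice (PySem.List.pyRange start (start + L ^ 2))
              (some (i - L + 1)) (some (i + 1))]
          else m)
        (PySem.List.pyRange start (start + L ^ 2)) 0 []]
  rw [PySem.List.foldl_append_if
        (fun (p : Int × Int) => PySem.Int.mod (p.1 + 1) L == 0)
        (fun (p : Int × Int) => PySem.List.slice
          (PySem.List.pyRange start (start + L ^ 2)) (some (p.1 - L + 1)) (some (p.1 + 1))),
      PySem.List.enumerate_eq_map_pyRange _ 0, List.filter_map, List.map_map,
      List.nil_append]
  obtain ⟨a, ha⟩ : ∃ a : Nat, L = (a : Int) := ⟨L.toNat, by omega⟩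
  have hlen : PySem.List.len (PySem.List.pyRange start (start + L ^ 2)) = (L.toNat : Int) * L := by
    rw [PySem.List.len_eq, PySem.List.length_pyRange_one,
        show start + L ^ 2 - start = L * L by ring, ha,
        show ((a : Int) * a) = ((a * a : Nat) : Int) by push_cast; ring,
        Int.toNat_natCast, Int.toNat_natCast]
    push_cast; ring
  rw [hlen]
  have hcomp : ((fun (p : Int × Int) => PySem.Int.mod (p.1 + 1) L == 0) ∘
      (fun j => (j, PySem.List.pyGetD (PySem.List.pyRange start (start + L ^ 2)) j 0)))
      = (fun j => PySem.Int.mod (j + 1) L == 0) := rfl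
  rw [hcomp, filt L hL L.toNat, List.map_map,
      show ((L.toNat : Nat) : Int) = L by omega]
  apply List.map_congr_left
  intro r hr
  rw [PySem.List.mem_pyRange_one] at hr
  simp only [Function.comp]
  exact slice_ids start L r hL (by omega) (by omega)

theorem row_step (start L r K : Int) (hr0 : 0 ≤ r) (hr : r < L)
    (hK : K = L - 1 - r) (acc : Option Int) :
    (PySem.List.enumerate (PySem.List.pyRange (start + r * L) (start + r * L + L))).foldl
        (fun (res : Option Int) q => if q.1 ≤ K then optStep res q.2 else res) acc
      = (PySem.List.pyRange (start + r * L) (start + r * L + (L - r))).foldl optStep acc := by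
  rw [inner_fold K _ 0 acc le_rfl,
      show (K - 0 + 1).toNat
          = ((start + r * L + (L - r)) - (start + r * L)).toNat by omega,
      take_pyRange _ _ _ (by omega) (by omega)]

theorem row_ne_nil (a b : Int) (h : a < b) : PySem.List.pyRange a b ≠ [] := by
  rw [PySem.List.pyRange_one_cons h]
  exact List.cons_ne_nil _ _

theorem outer (start L : Int) (hL : 0 < L) : ∀ m : Nat, 1 ≤ m → (m : Int) ≤ L →
    ((PySem.List.pyRange 0 (m : Int)).map
        (fun r => PySem.List.pyRange (start + r * L) (start + r * L + L))).foldl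
        stepE (L - 1, none)
      = (L - 1 - (m : Int), some (G start L (PySem.List.pyRange 0 (m : Int)))) := by
  intro m
  induction m with
  | zero => intro h; exact absurd h (by omega)
  | succ m ih =>
    intro _ hle
    by_cases hm : m = 0
    · subst hm
      rw [show ((0 + 1 : Nat) : Int) = 0 + 1 by norm_num,
          PySem.List.pyRange_one_singleton 0]
      simp only [List.map_cons, List.map_nil, List.foldl_cons, List.foldl_nil]
      unfold stepE G
      simp only [List.foldl_cons, List.foldl_nil]
      simp only [Prod.mk.injEq]
      refine ⟨rfl, ?_⟩
      rw [row_step start L 0 (L - 1) le_rfl (by omega) (by omega) none,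
          optFold_none _ (row_ne_nil _ _ (by omega))]
      rw [zero_bxor]
      rfl
    · have h1 : (1 : Int) ≤ (m : Int) := by omega
      rw [show ((m + 1 : Nat) : Int) = (m : Int) + 1 by push_cast; ring,
          PySem.List.pyRange_one_succ_right (by omega), List.map_append,
          List.foldl_append, ih (by omega) (by omega)]
      simp only [List.map_cons, List.map_nil, List.foldl_cons, List.foldl_nil]
      unfold stepE
      simp only [Prod.mk.injEq]
      refine ⟨by ring, ?_⟩
      rw [row_step start L (m : Int) (L - 1 - (m : Int)) (by omega) (by omega) rfl,
          optFold_some, hoist]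
      unfold G
      rw [List.foldl_append]
      simp only [List.foldl_cons, List.foldl_nil]
      rfl

theorem fold_empty_rows (M : List (List Int)) :
    ∀ st : Int × Option Int, (∀ arr ∈ M, arr = ([] : List Int)) →
      (M.foldl stepE st).2 = st.2 := by
  induction M with
  | nil => intro st _; rfl
  | cons arr M ih =>
    intro st h
    rw [List.foldl_cons]
    rw [ih _ (fun a ha => h a (List.mem_cons_of_mem _ ha))]
    rw [h arr List.mem_cons_self]
    rfl

theorem sol_nonpos (start L : Int) (hL : L ≤ 0) : solution start L = none := by
  rw [solution_unfold, stepF_eq_stepE]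
  rcases (show L = 0 ∨ L < 0 by omega) with h | h
  · subst h
    unfold matrixDef
    rw [PySem.List.pyRange_one_eq_nil (by norm_num)]
    rfl
  · apply fold_empty_rows
    intro arr harr
    simp only [matrixDef] at harr
    rw [foldl_enum_bridge
          (fun i m _v =>
            if PySem.Int.mod (i + 1) L == 0 then
              m ++ [PySem.List.slice (PySem.List.pyRange start (start + L ^ 2))
                (some (i - L + 1)) (some (i + 1))]
            else m)
          (PySem.List.pyRange start (start + L ^ 2)) 0 []] at harr
    rw [PySem.List.foldl_append_if
          (fun (p : Int × Int) => PySem.Int.mod (p.1 + 1) L == 0)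
          (fun (p : Int × Int) => PySem.List.slice
            (PySem.List.pyRange start (start + L ^ 2)) (some (p.1 - L + 1)) (some (p.1 + 1))),
        List.nil_append] at harr
    rw [List.mem_map] at harr
    obtain ⟨p, hp, hslice⟩ := harr
    have hp' := List.mem_of_mem_filter hp
    rw [PySem.List.mem_enumerate_iff] at hp'
    obtain ⟨k, hk, hpk⟩ := hp'
    have hp1 : 0 ≤ p.1 := by rw [hpk]; simp
    rw [← hslice, PySem.List.slice_toNat _ (by omega) (by omega)]
    rw [show (p.1 + 1).toNat - (p.1 - L + 1).toNat = 0 by omega]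
    simp

theorem sol_pos (start L : Int) (hL : 0 < L) :
    solution start L = some (G start L (PySem.List.pyRange 0 L)) := by
  have h := outer start L hL L.toNat (by omega) (by omega)
  rw [show ((L.toNat : Nat) : Int) = L by omega] at h
  rw [solution_unfold, stepF_eq_stepE, matrix_eq start L hL, h]

-- ===== VERDICT (by name: the statement is the Claim_ definition above) =====
theorem solution_spec : Claim_equal_solution := by
  intro start L _
  unfold Spec_solution
  rcases (show L ≤ 0 ∨ 0 < L by omega) with h | h
  · rw [sol_nonpos start L h]
    unfold solution_alt
    rw [if_pos h]
  · rw [sol_pos start L h, alt_eq start L h]
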